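-- pv_equiv track=rewrite | github.com/pypi-data/pypi-mirror-77 | packages/decap/decap-0.0.1.tar.gz/decap-0.0.1/decap/__init__.py | decap
-- ===== SOURCE A (Python) =====
-- cap = "ABCDEFGHIJKLMNOPQRSTUVWXYZ"
--
-- alph = "abcdefghijklmnopqrstuvwxyz"
--
-- def decap(text):
--     output = ""
--     for i in text:
--         if i in cap:
--             output += alph[cap.index(i)]
--         else:
--             output += i
--     return output
-- ===== SOURCE B (Python) =====
-- def decap(text):
--     # Case-shift by character-code arithmetic: uppercase ASCII letters occupy the
--     # contiguous code range 65..90 and their lowercase forms are exactly 32 higher,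
--     # so no alphabet table or membership scan is needed at all.
--     return "".join(chr(o + 32) if 65 <= o <= 90 else chr(o) for o in map(ord, text))
-- ===== Notes on version B (the rewrite author's own statement) =====
-- stated objective: alternative
-- what changed: Replaced the membership test against the cap alphabet plus cap.index scan and string concatenation with closed-form character-code arithmetic: a single join over ord values that adds 32 to codes in the contiguous range 65..90.
import Mathlib
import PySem

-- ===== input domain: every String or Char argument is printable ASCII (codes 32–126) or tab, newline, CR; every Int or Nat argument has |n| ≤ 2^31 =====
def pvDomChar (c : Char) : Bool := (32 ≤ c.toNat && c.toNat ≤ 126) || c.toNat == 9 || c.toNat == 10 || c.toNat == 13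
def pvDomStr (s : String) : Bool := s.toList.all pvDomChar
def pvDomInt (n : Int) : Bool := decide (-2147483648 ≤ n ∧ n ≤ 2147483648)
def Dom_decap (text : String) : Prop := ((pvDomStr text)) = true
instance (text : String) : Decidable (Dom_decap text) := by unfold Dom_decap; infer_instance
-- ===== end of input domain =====

-- B replaces A's alphabet-table membership test + cap.index scan + concatenation loop
-- by closed-form character-code arithmetic (add 32 to codes in the range 65..90).

-- ===== PORT A =====
-- cap = "ABC…Z", alph = "abc…z" (as character lists)
def capL : List Char :=
  ['A','B','C','D','E','F','G','H','I','J','K','L','M','N','O','P','Q','R','S','T','U','V','W','X','Y','Z']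
def alphL : List Char :=
  ['a','b','c','d','e','f','g','h','i','j','k','l','m','n','o','p','q','r','s','t','u','v','w','x','y','z']

def decap (text : String) : String :=
  String.mk (text.toList.foldl
    (fun output c =>
      if PySem.Chars.isIn [c] capL then
        -- the guard guarantees cap.index(i) is in range, so pyGet? is some here
        output ++ (PySem.List.pyGet? alphL (PySem.Chars.find capL [c])).toList
      else
        output ++ [c]) [])

-- ===== PORT B =====
-- "".join(chr(o+32) if 65 <= o <= 90 else chr(o) for o in map(ord, text));
-- chr(ord(c)) = c, and chr(o+32) for 65 ≤ o ≤ 90 is Char.ofNat (c.toNat + 32) (exact)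
def decap_alt (text : String) : String :=
  String.mk (text.toList.map (fun c =>
    if 65 ≤ c.toNat ∧ c.toNat ≤ 90 then Char.ofNat (c.toNat + 32) else c))

-- ===== PRECONDITION & SPEC =====
def Spec_decap (text : String) (out : String) : Prop := out = decap_alt text
instance (text : String) (out : String) : Decidable (Spec_decap text out) := by unfold Spec_decap; infer_instance

-- ===== CLAIM (what is proved, stated in full; the proofs are below) =====
def Claim_equal_decap : Prop := ∀ (text : String), Dom_decap text → Spec_decap text (decap text)

-- ===== LEMMAS AND PROOFS =====

-- a character whose code lies in 65..90 is one of the 26 capital letters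
theorem mem_capL_of_range (c : Char) (h : 65 ≤ c.toNat ∧ c.toNat ≤ 90) : c ∈ capL := by
  obtain ⟨h1, h2⟩ := h
  rw [← Char.ofNat_toNat c]
  interval_cases h : c.toNat <;> decide

-- the two per-character steps agree on every character
theorem decap_step (c : Char) :
    (if PySem.Chars.isIn [c] capL then
        (PySem.List.pyGet? alphL (PySem.Chars.find capL [c])).toList
     else [c])
    = [if 65 ≤ c.toNat ∧ c.toNat ≤ 90 then Char.ofNat (c.toNat + 32) else c] := by
  by_cases h : c ∈ capL
  · fin_cases h <;> decide
  · have h1 : PySem.Chars.isIn [c] capL = false := by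
      rw [PySem.Chars.isIn_eq_false_iff]
      intro hinf
      exact h (List.singleton_sublist.mp hinf.sublist)
    have h2 : ¬ (65 ≤ c.toNat ∧ c.toNat ≤ 90) := fun hr => h (mem_capL_of_range c hr)
    simp [h1, h2]

-- ===== VERDICT (by name: the statement is the Claim_ definition above) =====
theorem decap_spec : Claim_equal_decap := by
  intro text _
  unfold Spec_decap decap decap_alt
  have hfun :
      (fun (output : List Char) (c : Char) =>
        if PySem.Chars.isIn [c] capL then
          output ++ (PySem.List.pyGet? alphL (PySem.Chars.find capL [c])).toList
        else output ++ [c])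
      = fun (output : List Char) (c : Char) =>
          output ++ (if PySem.Chars.isIn [c] capL then
              (PySem.List.pyGet? alphL (PySem.Chars.find capL [c])).toList
            else [c]) := by
    funext output c
    by_cases h : PySem.Chars.isIn [c] capL <;> simp [h]
  rw [hfun]
  rw [PySem.List.foldl_append_eq_flatMap]
  congr 1
  rw [List.flatMap_congr (fun c _ => decap_step c)]
  exact Eq.symm List.map_eq_flatMap
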